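-- pv_equiv track=rewrite | github.com/Chinyass/netcontrol | controllers/switch/Eltex_switch.py | _add_to_place
-- ===== SOURCE A (Python) =====
-- def _add_to_place(vlans,bin_vlans,num,value):
--   for vlan in vlans:
--      if num == 2:
--         bin_vlans = bin_vlans[:(int(vlan)-1)] + value + bin_vlans[(int(vlan)-1) + 1:]
--      elif num == 3:
--         bin_vlans = bin_vlans[:(int(vlan)-1-1024)] + value + bin_vlans[(int(vlan)-1-1024) + 1:]
--      elif num == 4:
--         bin_vlans = bin_vlans[:(int(vlan)-1-2048)] + value + bin_vlans[(int(vlan)-1-2048) + 1:]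
--      elif num == 5:
--         bin_vlans = bin_vlans[:(int(vlan)-1-3072)] + value + bin_vlans[(int(vlan)-1-3072) + 1:]
--
--   return bin_vlans
-- ===== SOURCE B (Python) =====
-- def _add_to_place(vlans, bin_vlans, num, value):
--     if num not in (2, 3, 4, 5):
--         return bin_vlans
--     offset = (num - 2) * 1024
--     targets = {int(v) - 1 - offset for v in vlans}
--     return ''.join(value if i in targets else c for i, c in enumerate(bin_vlans))
-- ===== Notes on version B (the rewrite author's own statement) =====
-- stated objective: alternative
-- what changed: B computes the offset once, collects the set of target indices first, and rebuilds the string in a single enumerate pass, instead of A's per-vlan slice-and-concatenate rebuild of the whole string.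
-- outside the precondition, e.g. on _add_to_place(['5'], '000', 2, '1'): A returns '0001', B returns '000'; on _add_to_place(['-2'], '000', 2, '1'): A returns '100', B returns '000'; on _add_to_place(['1', '2'], '00', 2, 'XY'): A returns 'XXY0', B returns 'XYXY'
import Mathlib
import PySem

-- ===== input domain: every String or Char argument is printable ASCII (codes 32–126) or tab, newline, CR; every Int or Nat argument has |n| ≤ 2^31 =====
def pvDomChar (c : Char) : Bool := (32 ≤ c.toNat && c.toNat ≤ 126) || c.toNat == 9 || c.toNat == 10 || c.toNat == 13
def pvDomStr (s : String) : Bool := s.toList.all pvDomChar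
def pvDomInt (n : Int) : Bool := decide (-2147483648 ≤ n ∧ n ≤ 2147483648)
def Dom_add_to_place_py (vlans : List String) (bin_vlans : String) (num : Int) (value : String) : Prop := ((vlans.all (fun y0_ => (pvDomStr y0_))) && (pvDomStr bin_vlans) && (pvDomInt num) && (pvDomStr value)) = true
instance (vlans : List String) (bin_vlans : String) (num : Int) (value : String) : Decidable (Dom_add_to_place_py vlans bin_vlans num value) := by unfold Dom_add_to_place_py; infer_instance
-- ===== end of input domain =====

-- B collects the set of target indices first and rebuilds the string in one enumerate pass,
-- instead of A's per-vlan slice-and-concatenate rebuild (objective: alternative).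

-- ===== PORT A =====
-- one iteration of A's for-loop, on the char list of bin_vlans
-- (int(vlan) = PySem.Int.ofStr?; Pre_ excludes the none/ValueError case, so getD 0 is never taken)
def addStepA (num : Int) (value : List Char) (s : List Char) (vlan : String) : List Char :=
  if num = 2 then
    PySem.List.slice s none (some ((PySem.Int.ofStr? vlan).getD 0 - 1)) ++ value ++
      PySem.List.slice s (some (((PySem.Int.ofStr? vlan).getD 0 - 1) + 1)) none
  else if num = 3 then
    PySem.List.slice s none (some ((PySem.Int.ofStr? vlan).getD 0 - 1 - 1024)) ++ value ++
      PySem.List.slice s (some (((PySem.Int.ofStr? vlan).getD 0 - 1 - 1024) + 1)) none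
  else if num = 4 then
    PySem.List.slice s none (some ((PySem.Int.ofStr? vlan).getD 0 - 1 - 2048)) ++ value ++
      PySem.List.slice s (some (((PySem.Int.ofStr? vlan).getD 0 - 1 - 2048) + 1)) none
  else if num = 5 then
    PySem.List.slice s none (some ((PySem.Int.ofStr? vlan).getD 0 - 1 - 3072)) ++ value ++
      PySem.List.slice s (some (((PySem.Int.ofStr? vlan).getD 0 - 1 - 3072) + 1)) none
  else s

def add_to_place_py (vlans : List String) (bin_vlans : String) (num : Int) (value : String) : String :=
  String.ofList (vlans.foldl (addStepA num value.toList) bin_vlans.toList)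

-- ===== PORT B =====
def add_to_place_py_alt (vlans : List String) (bin_vlans : String) (num : Int) (value : String) : String :=
  if num = 2 ∨ num = 3 ∨ num = 4 ∨ num = 5 then
    let offset := (num - 2) * 1024
    let targets : PySem.Set Int :=
      PySem.Set.ofList (vlans.map (fun v => (PySem.Int.ofStr? v).getD 0 - 1 - offset))
    String.ofList (((PySem.List.enumerate bin_vlans.toList).map
      (fun ic => if targets.contains ic.1 then value.toList else [ic.2])).flatten)
  else bin_vlans

-- ===== PRECONDITION & SPEC =====
-- per-vlan check: int(vlan) parses and the derived index lies inside [0, len(bin_vlans))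
def pvGoodIdx (bin_vlans : String) (num : Int) (v : String) : Bool :=
  match PySem.Int.ofStr? v with
  | some n => decide (0 ≤ n - 1 - (num - 2) * 1024 ∧ n - 1 - (num - 2) * 1024 < (bin_vlans.toList.length : Int))
  | none => false

-- Pre_ excludes inputs on which A raises (a vlan that int() cannot parse, ValueError) and, when num ∈ {2,3,4,5}
-- and vlans is non-empty, inputs where value is not a single character or a vlan-derived index falls outside
-- [0, len(bin_vlans)): there A's slice-rebuilding accidentally wraps (negative index), appends past the end,
-- or shifts later positions — artefacts of the slicing that an index-set rebuild cannot match.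
def Pre_add_to_place_py (vlans : List String) (bin_vlans : String) (num : Int) (value : String) : Prop :=
  (num = 2 ∨ num = 3 ∨ num = 4 ∨ num = 5) →
    ((∀ v ∈ vlans, pvGoodIdx bin_vlans num v = true) ∧ (vlans = [] ∨ value.toList.length = 1))
instance (vlans : List String) (bin_vlans : String) (num : Int) (value : String) : Decidable (Pre_add_to_place_py vlans bin_vlans num value) := by unfold Pre_add_to_place_py; infer_instance

def pvWitness_add_to_place_py : List String × String × Int × String := (["1", "3"], "0000", 2, "1")

def Spec_add_to_place_py (vlans : List String) (bin_vlans : String) (num : Int) (value : String) (out : String) : Prop := out = add_to_place_py_alt vlans bin_vlans num value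
instance (vlans : List String) (bin_vlans : String) (num : Int) (value : String) (out : String) : Decidable (Spec_add_to_place_py vlans bin_vlans num value out) := by unfold Spec_add_to_place_py; infer_instance

-- ===== CLAIM (what is proved, stated in full; the proofs are below) =====
def Claim_equal_add_to_place_py : Prop := ∀ (vlans : List String) (bin_vlans : String) (num : Int) (value : String), Dom_add_to_place_py vlans bin_vlans num value → Pre_add_to_place_py vlans bin_vlans num value → Spec_add_to_place_py vlans bin_vlans num value (add_to_place_py vlans bin_vlans num value)

-- ===== LEMMAS AND PROOFS =====

-- a single in-range slice-rebuild step is List.set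
lemma pv_slice_step (s : List Char) (c : Char) (i : Int) (h0 : 0 ≤ i) (h1 : i < (s.length : Int)) :
    PySem.List.slice s none (some i) ++ [c] ++ PySem.List.slice s (some (i + 1)) none
      = s.set i.toNat c := by
  rw [PySem.List.slice_to s h0, PySem.List.slice_from s (by omega : (0:Int) ≤ i + 1)]
  have h2 : (i + 1).toNat = i.toNat + 1 := by omega
  rw [h2, List.set_eq_take_append_cons_drop, if_pos (by omega : i.toNat < s.length)]
  simp

lemma pv_foldl_slice_eq_set (idxs : List Int) (bl : List Char) (c : Char)
    (h : ∀ i ∈ idxs, 0 ≤ i ∧ i < (bl.length : Int)) :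
    idxs.foldl (fun s i =>
        PySem.List.slice s none (some i) ++ [c] ++ PySem.List.slice s (some (i + 1)) none) bl
      = idxs.foldl (fun s i => s.set i.toNat c) bl := by
  induction idxs generalizing bl with
  | nil => rfl
  | cons i rest ih =>
      have hi := h i (by simp)
      simp only [List.foldl_cons, pv_slice_step bl c i hi.1 hi.2]
      exact ih (bl.set i.toNat c) (by
        intro j hj
        have := h j (by simp [hj])
        simpa using this)

lemma pv_foldl_set_get? (idxs : List Int) (bl : List Char) (c : Char)
    (h : ∀ i ∈ idxs, 0 ≤ i) (j : Nat) :
    (idxs.foldl (fun s i => s.set i.toNat c) bl)[j]?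
      = if (j : Int) ∈ idxs ∧ j < bl.length then some c else bl[j]? := by
  induction idxs generalizing bl with
  | nil => simp
  | cons i rest ih =>
      have h0 : 0 ≤ i := h i (by simp)
      rw [List.foldl_cons, ih (bl.set i.toNat c) (fun x hx => h x (by simp [hx]))]
      simp only [List.length_set, List.getElem?_set, List.mem_cons]
      by_cases hlen : j < bl.length
      · by_cases hj : (j : Int) = i
        · have hij : i.toNat = j := by omega
          by_cases hm : (j : Int) ∈ rest <;> simp [hm, hlen, hj, hij]
        · have hij : i.toNat ≠ j := by omega
          by_cases hm : (j : Int) ∈ rest <;> simp [hm, hlen, hj, hij]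
      · have hbn : bl[j]? = none := List.getElem?_eq_none (by omega)
        by_cases hj : (j : Int) = i
        · have hij : i.toNat = j := by omega
          by_cases hm : (j : Int) ∈ rest <;> simp [hm, hlen, hj, hij, hbn]
        · have hij : i.toNat ≠ j := by omega
          by_cases hm : (j : Int) ∈ rest <;> simp [hm, hlen, hj, hij, hbn]

lemma pv_flatten_map_singleton {α β : Type} (l : List β) (f : β → α) :
    (l.map (fun x => [f x])).flatten = l.map f := by
  induction l with
  | nil => rfl
  | cons a t ih => simp [ih]

-- A's fold over in-range indices equals B's enumerate pass over the index set
lemma pv_core (idxs : List Int) (bl : List Char) (c : Char)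
    (h : ∀ i ∈ idxs, 0 ≤ i ∧ i < (bl.length : Int)) :
    idxs.foldl (fun s i =>
        PySem.List.slice s none (some i) ++ [c] ++ PySem.List.slice s (some (i + 1)) none) bl
      = (PySem.List.enumerate bl).map
          (fun ic => if (PySem.Set.ofList idxs).contains ic.1 then c else ic.2) := by
  rw [pv_foldl_slice_eq_set idxs bl c h]
  apply List.ext_getElem?
  intro j
  rw [pv_foldl_set_get? idxs bl c (fun i hi => (h i hi).1) j]
  rw [List.getElem?_map, PySem.List.getElem?_enumerate]
  by_cases hlen : j < bl.length
  · rw [List.getElem?_eq_getElem hlen]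
    by_cases hm : (j : Int) ∈ idxs
    · simp [hm, hlen]
    · simp [hm, hlen]
  · rw [List.getElem?_eq_none (by omega : bl.length ≤ j)]
    simp [hlen]

-- ===== VERDICT (by name: the statement is the Claim_ definition above) =====
set_option maxHeartbeats 1000000 in
theorem add_to_place_py_spec : Claim_equal_add_to_place_py := by
  intro vlans bin_vlans num value _hdom hpre
  unfold Spec_add_to_place_py add_to_place_py add_to_place_py_alt
  by_cases hnum : num = 2 ∨ num = 3 ∨ num = 4 ∨ num = 5
  · obtain ⟨hgood, hval⟩ := hpre hnum
    rw [if_pos hnum]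
    dsimp only
    rcases hval with hnil | hlen
    · -- empty vlan list: the fold is a no-op and the target set is empty
      subst hnil
      simp only [List.foldl_nil, List.map_nil]
      rw [List.map_congr_left (g := fun ic : Int × Char => [ic.2]) (by
        intro a _
        rw [if_neg (by rw [PySem.Set.contains_iff, PySem.Set.mem_ofList]; simp)])]
      rw [pv_flatten_map_singleton, PySem.List.map_snd_enumerate, String.ofList_toList]
    · obtain ⟨c, hc⟩ : ∃ c, value.toList = [c] := by
        cases hv : value.toList with
        | nil => rw [hv] at hlen; simp at hlen
        | cons a t =>
            cases t with
            | nil => exact ⟨a, rfl⟩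
            | cons b u => rw [hv] at hlen; simp at hlen
      rw [hc]
      have hbound : ∀ i ∈ vlans.map (fun v => (PySem.Int.ofStr? v).getD 0 - 1 - (num - 2) * 1024),
          0 ≤ i ∧ i < (bin_vlans.toList.length : Int) := by
        intro i hi
        obtain ⟨v, hv, rfl⟩ := List.mem_map.mp hi
        have hg := hgood v hv
        unfold pvGoodIdx at hg
        cases hof : PySem.Int.ofStr? v with
        | none => rw [hof] at hg; simp at hg
        | some n =>
            rw [hof] at hg
            simp only [decide_eq_true_eq] at hg
            simpa [hof] using hg
      have hmain : vlans.foldl (addStepA num [c]) bin_vlans.toList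
          = (PySem.List.enumerate bin_vlans.toList).map
              (fun ic => if (PySem.Set.ofList (vlans.map (fun v =>
                (PySem.Int.ofStr? v).getD 0 - 1 - (num - 2) * 1024))).contains ic.1 then c else ic.2) := by
        have hfun : addStepA num [c] = fun s v =>
            PySem.List.slice s none (some ((PySem.Int.ofStr? v).getD 0 - 1 - (num - 2) * 1024)) ++ [c] ++
              PySem.List.slice s (some (((PySem.Int.ofStr? v).getD 0 - 1 - (num - 2) * 1024) + 1)) none := by
          funext s v
          rcases hnum with h | h | h | h <;> subst h <;> norm_num [addStepA]
        rw [hfun]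
        have hfm := List.foldl_map
          (f := fun v : String => (PySem.Int.ofStr? v).getD 0 - 1 - (num - 2) * 1024)
          (g := fun (s : List Char) (i : Int) =>
            PySem.List.slice s none (some i) ++ [c] ++ PySem.List.slice s (some (i + 1)) none)
          (l := vlans) (init := bin_vlans.toList)
        exact hfm ▸ pv_core _ _ c hbound
      rw [hmain]
      congr 1
      rw [List.map_congr_left (g := fun ic : Int × Char =>
        [if (PySem.Set.ofList (vlans.map (fun v =>
            (PySem.Int.ofStr? v).getD 0 - 1 - (num - 2) * 1024))).contains ic.1 then c else ic.2]) (by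
          intro a _; dsimp only; split <;> rfl)]
      rw [pv_flatten_map_singleton]
  · -- num outside {2,3,4,5}: A's loop body does nothing and B returns bin_vlans
    rw [if_neg hnum]
    simp only [not_or] at hnum
    obtain ⟨h2, h3, h4, h5⟩ := hnum
    have hstep : ∀ (l : List String) (s : List Char), l.foldl (addStepA num value.toList) s = s := by
      intro l
      induction l with
      | nil => intro s; rfl
      | cons a t ih => intro s; rw [List.foldl_cons, show addStepA num value.toList s a = s by
          simp [addStepA, h2, h3, h4, h5]]; exact ih s
    rw [hstep, String.ofList_toList]
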